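-- pv_equiv track=rewrite | github.com/mrliangcb/pri_lcb | my_app/web/dup_check.py | source_dup_dic
-- ===== SOURCE A (Python) =====
-- def source_dup_dic(result_str):#
--     result_str_plus=[]
--     temp=[]
--     for i in range(len(result_str)):
--         for j in range(0,len(result_str[i])):
--             if result_str[i][j]!='':
--                 temp.append(result_str[i][j])
--                 if j==len(result_str[i])-1:
--                     if temp:
--                         if len(temp)>=13:
--                             result_str_plus.append(''.join(temp))
--                         temp = []
--             else:
--                 if temp:
--                     if len(temp) >= 13:
--                         result_str_plus.append(''.join(temp))
--                     temp=[]
--     if not result_str_plus:result_str_plus.append('')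
--     source_dup_dic={}
--     for k,v in enumerate(result_str_plus):
--         source_dup_dic[str(k)]=v
--     return source_dup_dic
-- ===== SOURCE B (Python) =====
-- def source_dup_dic(result_str):
--     out = []
--     for row in result_str:
--         j, n = 0, len(row)
--         while j < n:
--             if row[j] == '':
--                 j += 1
--             else:
--                 k = j + 1
--                 while k < n and row[k] != '':
--                     k += 1
--                 if k - j >= 13:
--                     out.append(''.join(row[j:k]))
--                 j = k
--     if not out:
--         out.append('')
--     return {str(i): v for i, v in enumerate(out)}
-- ===== Notes on version B (the rewrite author's own statement) =====
-- stated objective: simpler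
-- what changed: Replaces A's accumulator-with-flush state machine (temp list flushed at '' and at the last index of each row) by a two-pointer scan that locates each maximal nonempty run in a row directly and joins the slice, then builds the dict by comprehension.
import Mathlib
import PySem

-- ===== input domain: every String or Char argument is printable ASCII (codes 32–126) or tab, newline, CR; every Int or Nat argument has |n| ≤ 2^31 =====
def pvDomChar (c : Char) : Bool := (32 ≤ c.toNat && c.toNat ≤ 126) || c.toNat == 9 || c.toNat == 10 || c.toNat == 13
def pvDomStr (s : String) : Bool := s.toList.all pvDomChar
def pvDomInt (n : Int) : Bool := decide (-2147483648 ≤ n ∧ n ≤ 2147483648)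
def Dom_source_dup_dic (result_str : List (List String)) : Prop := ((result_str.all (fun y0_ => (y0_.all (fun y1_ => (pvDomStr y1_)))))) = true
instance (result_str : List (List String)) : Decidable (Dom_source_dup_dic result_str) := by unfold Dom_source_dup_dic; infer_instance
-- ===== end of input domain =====

-- B replaces A's accumulator-with-flush state machine by a two-pointer run scan per row
-- (objective: simpler); the return value (an insertion-ordered dict as an association list) is proved equal.

-- ===== PORT A =====
-- A's inner loop body: state is (result_str_plus, temp); jx = (j, result_str[i][j]); n = len(result_str[i]).
def pvStepA (n : Int) (st : List String × List String) (jx : Int × String) : List String × List String :=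
  let plus := st.1
  let temp := st.2
  if jx.2 ≠ "" then
    let temp := temp ++ [jx.2]
    if jx.1 = n - 1 then
      if temp ≠ [] then
        ((if 13 ≤ temp.length then plus ++ [PySem.Str.join "" temp] else plus), [])
      else (plus, temp)
    else (plus, temp)
  else
    if temp ≠ [] then
      ((if 13 ≤ temp.length then plus ++ [PySem.Str.join "" temp] else plus), [])
    else (plus, temp)

def source_dup_dic (result_str : List (List String)) : List (String × String) :=
  let st := result_str.foldl
    (fun st row => (PySem.List.enumerate row 0).foldl (pvStepA (row.length : Int)) st) ([], [])
  let plus := if st.1 = [] then [""] else st.1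
  ((PySem.List.enumerate plus 0).foldl
    (fun d kv => d.insert (PySem.Int.toStr kv.1) kv.2) PySem.Dict.empty).items

-- ===== PORT B =====
-- Source B's two-pointer scan: at a nonempty element, the inner while-scan to the next '' is the
-- takeWhile/dropWhile split; the run row[j:k] is joined if it has >= 13 elements.
def pvRuns : List String → List String
  | [] => []
  | x :: rest =>
    if x = "" then pvRuns rest
    else
      let run := x :: rest.takeWhile (fun s => s != "")
      (if 13 ≤ run.length then [PySem.Str.join "" run] else []) ++
        pvRuns (rest.dropWhile (fun s => s != ""))
termination_by l => l.length
decreasing_by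
  · simp
  · have := List.length_dropWhile_le (p := fun s => s != "") (l := rest)
    simp; omega

def source_dup_dic_alt (result_str : List (List String)) : List (String × String) :=
  let out := result_str.foldl (fun acc row => acc ++ pvRuns row) []
  let out := if out = [] then [""] else out
  ((PySem.List.enumerate out 0).foldl
    (fun d kv => d.insert (PySem.Int.toStr kv.1) kv.2) PySem.Dict.empty).items

-- ===== PRECONDITION & SPEC =====
def Spec_source_dup_dic (result_str : List (List String)) (out : List (String × String)) : Prop := out = source_dup_dic_alt result_str
instance (result_str : List (List String)) (out : List (String × String)) : Decidable (Spec_source_dup_dic result_str out) := by unfold Spec_source_dup_dic; infer_instance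

-- ===== CLAIM (what is proved, stated in full; the proofs are below) =====
def Claim_equal_source_dup_dic : Prop := ∀ (result_str : List (List String)), Dom_source_dup_dic result_str → Spec_source_dup_dic result_str (source_dup_dic result_str)

-- ===== LEMMAS AND PROOFS =====

-- flush of A's temp buffer, as a list to append
def pvFlush (t : List String) : List String :=
  if 13 ≤ t.length then [PySem.Str.join "" t] else []

-- semantics of A's inner loop over a row suffix, carrying the pending temp buffer
def pvRunsAux : List String → List String → List String
  | temp, [] => pvFlush temp
  | temp, [x] => if x = "" then pvFlush temp else pvFlush (temp ++ [x])
  | temp, x :: rest => if x = "" then pvFlush temp ++ pvRunsAux [] rest else pvRunsAux (temp ++ [x]) rest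

lemma pvFlush_app (plus t : List String) :
    (if 13 ≤ t.length then plus ++ [PySem.Str.join "" t] else plus) = plus ++ pvFlush t := by
  unfold pvFlush; split_ifs <;> simp

lemma innerA (suffix : List String) (s n : Int) (plus temp : List String)
    (hn : s + suffix.length = n) (hne : suffix ≠ []) :
    (PySem.List.enumerate suffix s).foldl (pvStepA n) (plus, temp)
      = (plus ++ pvRunsAux temp suffix, []) := by
  induction suffix generalizing s plus temp with
  | nil => exact absurd rfl hne
  | cons x rest ih =>
    rw [PySem.List.enumerate_cons]
    cases rest with
    | nil =>
      have hs : s = n - 1 := by simp at hn; omega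
      by_cases hx : x = ""
      · subst hx
        have hstep : pvStepA n (plus, temp) (s, "") = (plus ++ pvFlush temp, []) := by
          by_cases ht : temp = [] <;> simp [pvStepA, ht, pvFlush, pvFlush_app]
        simp [List.foldl, hstep, pvRunsAux]
      · have hstep : pvStepA n (plus, temp) (s, x) = (plus ++ pvFlush (temp ++ [x]), []) := by
          simp [pvStepA, hx, hs, pvFlush]
          split_ifs <;> simp
        simp [List.foldl, hstep, pvRunsAux, hx]
    | cons y rs =>
      have hs : ¬ (s = n - 1) := by simp at hn ⊢; omega
      rw [List.foldl_cons]
      by_cases hx : x = ""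
      · subst hx
        have hstep : pvStepA n (plus, temp) (s, "") = (plus ++ pvFlush temp, []) := by
          by_cases ht : temp = [] <;> simp [pvStepA, ht, pvFlush, pvFlush_app]
        rw [hstep, ih (s + 1) (plus ++ pvFlush temp) [] (by simp at hn ⊢; omega) (by simp)]
        simp [pvRunsAux]
      · have hstep : pvStepA n (plus, temp) (s, x) = (plus, temp ++ [x]) := by
          simp [pvStepA, hx, hs]
        rw [hstep, ih (s + 1) plus (temp ++ [x]) (by simp at hn ⊢; omega) (by simp)]
        simp [pvRunsAux, hx]

lemma pvRuns_split (l : List String) :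
    pvFlush (l.takeWhile (fun s => s != "")) ++ pvRuns (l.dropWhile (fun s => s != "")) = pvRuns l := by
  cases l with
  | nil => simp [pvRuns, pvFlush]
  | cons x rest =>
    by_cases hx : x = ""
    · simp [pvRuns, hx, pvFlush, List.takeWhile, List.dropWhile]
    · rw [pvRuns]
      simp [hx, pvFlush]

lemma pvRunsAux_eq (suffix : List String) : ∀ temp,
    pvRunsAux temp suffix
      = pvFlush (temp ++ suffix.takeWhile (fun s => s != "")) ++ pvRuns (suffix.dropWhile (fun s => s != "")) := by
  induction suffix with
  | nil => intro temp; simp [pvRunsAux, pvRuns]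
  | cons x rest ih =>
    intro temp
    cases rest with
    | nil =>
      by_cases hx : x = "" <;>
        simp [pvRunsAux, hx, pvRuns, pvFlush]
    | cons y rs =>
      by_cases hx : x = ""
      · rw [show pvRunsAux temp (x :: y :: rs) = pvFlush temp ++ pvRunsAux [] (y :: rs) by
            simp [pvRunsAux, hx]]
        rw [ih []]
        simp only [List.nil_append]
        rw [pvRuns_split (y :: rs)]
        simp [hx, pvRuns]
      · rw [show pvRunsAux temp (x :: y :: rs) = pvRunsAux (temp ++ [x]) (y :: rs) by
            simp [pvRunsAux, hx]]
        rw [ih (temp ++ [x])]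
        simp [hx, List.takeWhile_cons, List.dropWhile_cons, List.append_assoc]

lemma innerA_runs (row plus : List String) :
    (PySem.List.enumerate row 0).foldl (pvStepA (row.length : Int)) (plus, [])
      = (plus ++ pvRuns row, []) := by
  cases hrow : row with
  | nil => simp [pvRuns]
  | cons x rest =>
    rw [← hrow, innerA row 0 (row.length : Int) plus [] (by simp) (by simp [hrow])]
    rw [pvRunsAux_eq row []]
    simp only [List.nil_append]
    rw [pvRuns_split row]

lemma outerA (rows : List (List String)) : ∀ plus,
    rows.foldl (fun st row => (PySem.List.enumerate row 0).foldl (pvStepA (row.length : Int)) st) (plus, [])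
      = (rows.foldl (fun acc row => acc ++ pvRuns row) plus, []) := by
  induction rows with
  | nil => intro plus; simp
  | cons r rs ih =>
    intro plus
    simp only [List.foldl_cons]
    rw [innerA_runs r plus, ih (plus ++ pvRuns r)]

-- ===== VERDICT (by name: the statement is the Claim_ definition above) =====
theorem source_dup_dic_spec : Claim_equal_source_dup_dic := by
  intro result_str _
  unfold Spec_source_dup_dic source_dup_dic source_dup_dic_alt
  rw [outerA result_str []]
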